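-- pv_equiv track=rewrite | github.com/Re-lena/fillet-iz_photo-bot | bot.py | generate_description_txt
-- ===== SOURCE A (Python) =====
-- def generate_description_txt(matrix):
--     lines = []
--     for idx, row_str in enumerate(matrix, start=1):
--         if not row_str:
--             lines.append(f"Ряд {idx}: пустая строка")
--             continue
--         groups = []
--         current = row_str[0]
--         count = 1
--         for ch in row_str[1:]:
--             if ch == current:
--                 count += 1
--             else:
--                 groups.append(f"{count} {'пустых' if current == '0' else 'заполненных'}")
--                 current = ch
--                 count = 1
--         groups.append(f"{count} {'пустых' if current == '0' else 'заполненных'}")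
--         lines.append(f"Ряд {idx}: " + ", ".join(groups))
--     return "\n".join(lines)
-- ===== SOURCE B (Python) =====
-- def generate_description_txt(matrix):
--     def runs(s):
--         res = []
--         while s:
--             k = 1
--             while k < len(s) and s[k] == s[0]:
--                 k += 1
--             res.append((s[0], k))
--             s = s[k:]
--         return res
--
--     def describe(idx, row):
--         if not row:
--             return f"Ряд {idx}: пустая строка"
--         return f"Ряд {idx}: " + ", ".join(
--             f"{n} {'пустых' if c == '0' else 'заполненных'}" for c, n in runs(row))
--
--     return "\n".join(describe(i + 1, row) for i, row in enumerate(matrix))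
-- ===== Notes on version B (the rewrite author's own statement) =====
-- stated objective: idiomatic
-- what changed: Replaces A's per-character current/count state machine with a run-splitting helper (take the leading run of equal characters, recurse on the remainder) and builds each line by a comprehension over the run list instead of flushing groups at boundaries.
import Mathlib
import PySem

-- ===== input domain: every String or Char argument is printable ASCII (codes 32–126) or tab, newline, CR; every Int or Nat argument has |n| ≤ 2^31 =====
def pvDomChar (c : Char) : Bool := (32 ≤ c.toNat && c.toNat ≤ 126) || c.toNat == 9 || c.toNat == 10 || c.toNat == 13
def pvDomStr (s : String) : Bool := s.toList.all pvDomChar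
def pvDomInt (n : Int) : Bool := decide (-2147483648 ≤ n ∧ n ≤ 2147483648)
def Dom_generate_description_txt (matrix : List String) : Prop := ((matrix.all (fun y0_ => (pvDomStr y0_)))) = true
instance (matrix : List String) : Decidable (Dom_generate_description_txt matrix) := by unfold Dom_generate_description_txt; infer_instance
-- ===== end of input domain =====

-- B replaces A's current/count state machine with a run-splitting helper plus a comprehension (idiomatic decomposition; same cost).


-- ===== PORT A =====
-- f"{count} {'пустых' if current == '0' else 'заполненных'}"
def gdGroupStr (count : Nat) (current : Char) : String :=
  toString count ++ " " ++ (if current = '0' then "пустых" else "заполненных")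

-- the inner 'for ch in row_str[1:]' state machine, plus the final flush
def gdLoopA : List Char → Char → Nat → List String → List String
  | [], current, count, groups => groups ++ [gdGroupStr count current]
  | ch :: rest, current, count, groups =>
    if ch = current then gdLoopA rest current (count + 1) groups
    else gdLoopA rest ch 1 (groups ++ [gdGroupStr count current])

-- one iteration of the outer loop (one row)
def gdRowA (idx : Int) (row : List Char) : String :=
  match row with
  | [] => "Ряд " ++ PySem.Int.toStr idx ++ ": пустая строка"
  | c :: rest => "Ряд " ++ PySem.Int.toStr idx ++ ": " ++
      String.intercalate ", " (gdLoopA rest c 1 [])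

-- the outer 'for idx, row_str in enumerate(matrix, start=1)' building lines
def gdLinesA : List String → Int → List String
  | [], _ => []
  | row :: rest, idx => gdRowA idx row.toList :: gdLinesA rest (idx + 1)

def generate_description_txt (matrix : List String) : String :=
  String.intercalate "\n" (gdLinesA matrix 1)

-- ===== PORT B =====
-- runs(s): leading run of equal characters, then recurse on the remainder
def gdRuns : List Char → List (Char × Nat)
  | [] => []
  | c :: rest =>
    (c, 1 + (rest.takeWhile (· == c)).length) :: gdRuns (rest.dropWhile (· == c))
termination_by l => l.length
decreasing_by
  exact Nat.lt_succ_of_le (List.length_dropWhile_le _ _)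

-- describe(idx, row)
def gdDescribe (idx : Int) (row : List Char) : String :=
  if row = [] then "Ряд " ++ PySem.Int.toStr idx ++ ": пустая строка"
  else "Ряд " ++ PySem.Int.toStr idx ++ ": " ++
    String.intercalate ", "
      ((gdRuns row).map (fun p =>
        toString p.2 ++ " " ++ (if p.1 = '0' then "пустых" else "заполненных")))

def generate_description_txt_alt (matrix : List String) : String :=
  String.intercalate "\n"
    ((PySem.List.enumerate matrix 0).map (fun p => gdDescribe (p.1 + 1) p.2.toList))

-- ===== PRECONDITION & SPEC =====
def Spec_generate_description_txt (matrix : List String) (out : String) : Prop := out = generate_description_txt_alt matrix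
instance (matrix : List String) (out : String) : Decidable (Spec_generate_description_txt matrix out) := by unfold Spec_generate_description_txt; infer_instance

-- ===== CLAIM (what is proved, stated in full; the proofs are below) =====
def Claim_equal_generate_description_txt : Prop := ∀ (matrix : List String), Dom_generate_description_txt matrix → Spec_generate_description_txt matrix (generate_description_txt matrix)

-- ===== LEMMAS AND PROOFS =====

-- unfolding lemmas for the well-founded gdRuns
theorem gdRuns_nil : gdRuns [] = [] := by simp [gdRuns]

theorem gdRuns_cons (c : Char) (rest : List Char) :
    gdRuns (c :: rest) =
      (c, 1 + (rest.takeWhile (· == c)).length) :: gdRuns (rest.dropWhile (· == c)) := by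
  rw [gdRuns]

-- A's state machine, started mid-run, emits the pending group completed by the
-- current run and then B's runs of the remainder.
theorem gdLoopA_eq_runs : ∀ (l : List Char) (c : Char) (count : Nat) (groups : List String),
    gdLoopA l c count groups =
      groups ++ ((c, count + (l.takeWhile (· == c)).length) :: gdRuns (l.dropWhile (· == c))).map
        (fun p => gdGroupStr p.2 p.1) := by
  intro l
  induction l with
  | nil => intro c count groups; simp [gdLoopA, gdRuns_nil]
  | cons ch rest ih =>
    intro c count groups
    by_cases h : ch = c
    · subst h
      simp only [gdLoopA, List.takeWhile_cons, beq_self_eq_true, if_pos,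
        List.dropWhile_cons, List.length_cons]
      rw [ih]
      simp [Nat.add_comm, Nat.add_assoc]
    · have hb : (ch == c) = false := beq_eq_false_iff_ne.mpr h
      simp only [gdLoopA, if_neg h, List.takeWhile_cons, hb, Bool.false_eq_true,
        if_false, List.dropWhile_cons, List.length_nil, Nat.add_zero]
      rw [ih, gdRuns_cons]
      simp [gdGroupStr]

-- per row, A's line equals B's line
theorem gdRowA_eq_describe (idx : Int) (row : List Char) :
    gdRowA idx row = gdDescribe idx row := by
  cases row with
  | nil => simp [gdRowA, gdDescribe]
  | cons c rest =>
    simp only [gdRowA, gdDescribe, if_neg (List.cons_ne_nil c rest)]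
    rw [gdLoopA_eq_runs, gdRuns_cons]
    simp [gdGroupStr]

theorem gdLinesA_eq_enumerate : ∀ (matrix : List String) (n : Int),
    gdLinesA matrix (n + 1) =
      (PySem.List.enumerate matrix n).map (fun p => gdDescribe (p.1 + 1) p.2.toList) := by
  intro matrix
  induction matrix with
  | nil => intro n; simp [gdLinesA, PySem.List.enumerate_nil]
  | cons row rest ih =>
    intro n
    rw [PySem.List.enumerate_cons]
    simp only [List.map_cons, gdLinesA, gdRowA_eq_describe]
    rw [ih]

-- ===== VERDICT (by name: the statement is the Claim_ definition above) =====
theorem generate_description_txt_spec : Claim_equal_generate_description_txt := by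
  intro matrix _
  unfold Spec_generate_description_txt generate_description_txt generate_description_txt_alt
  rw [show (1 : Int) = 0 + 1 by ring, gdLinesA_eq_enumerate]
  norm_num
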